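-- pv_equiv track=rewrite | github.com/John3210of/AnyPrac | 9rogramers/arr_slice.py | solution
-- ===== SOURCE A (Python) =====
-- def solution(n, left, right): # 메모리초과
--     answer = []
--     count=1
--     # count는 매라운드 증가하고 증가할때 i가 count보다 작거나 같으면 count로 채우기
--     while count<=n:
--         for i in range(1,n+1):
--             if i <= count:
--                 temp=count
--             else:
--                 temp=i
--             answer.append(temp)
--         count+=1
--
--     return answer[left:right+1]
-- ===== SOURCE B (Python) =====
-- def solution(n, left, right):
--     # The n*n table holds max(row, col) + 1 at flat index k (row = k // n,
--     # col = k % n).  Slice a range of flat indices (O(1)) and compute only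
--     # the requested values, instead of building the whole table.
--     idx = range(n * n)[left:right + 1]
--     return [max(k // n, k % n) + 1 for k in idx]
-- ===== Notes on version B (the rewrite author's own statement) =====
-- stated objective: faster
-- what changed: Instead of materialising the whole n*n table with nested loops and slicing it, B slices a flat index range (O(1) via range slicing) and computes each requested element directly as max(k//n, k%n)+1; Pre_ excludes negative n, outside the task's natural domain, where A's empty answer is an accident of its loop never running while B's virtual table of size n*n is nonempty.
-- outside the precondition, e.g. on solution(-2, 0, 3): A returns [], B returns [1, 0, 1, 0]
import Mathlib
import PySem

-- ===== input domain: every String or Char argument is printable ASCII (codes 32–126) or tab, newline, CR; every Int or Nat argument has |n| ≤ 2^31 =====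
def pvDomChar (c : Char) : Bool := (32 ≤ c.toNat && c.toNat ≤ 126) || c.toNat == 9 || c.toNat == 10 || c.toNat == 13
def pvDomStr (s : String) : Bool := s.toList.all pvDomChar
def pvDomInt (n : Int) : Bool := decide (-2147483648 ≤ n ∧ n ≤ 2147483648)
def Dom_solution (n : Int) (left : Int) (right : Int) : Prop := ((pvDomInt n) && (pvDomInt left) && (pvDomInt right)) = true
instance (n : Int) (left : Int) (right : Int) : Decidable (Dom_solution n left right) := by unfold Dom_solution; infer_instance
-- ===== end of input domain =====

-- B replaces A's O(n^2) table construction by slicing a flat index range and computing each requested element directly: faster (asymptotic).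

-- ===== PORT A =====
def solution (n : Int) (left : Int) (right : Int) : List Int :=
  -- while count<=n: for i in range(1,n+1): append(count if i<=count else i)
  let answer := (PySem.List.pyRange 1 (n+1) 1).foldl
    (fun acc count => (PySem.List.pyRange 1 (n+1) 1).foldl
      (fun acc2 i => acc2 ++ [if i ≤ count then count else i]) acc) []
  PySem.List.slice answer (some left) (some (right+1))

-- ===== PORT B =====
def solution_alt (n : Int) (left : Int) (right : Int) : List Int :=
  -- idx = range(n*n)[left:right+1]; [max(k//n, k%n) + 1 for k in idx]
  let idx := PySem.List.slice (PySem.List.pyRange 0 (n*n) 1) (some left) (some (right+1))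
  idx.map (fun k => max (PySem.Int.floordiv k n) (PySem.Int.mod k n) + 1)

-- ===== PRECONDITION & SPEC =====
-- Pre_ excludes only negative n, outside the task's natural domain: there A's empty answer is an
-- accident of its while-loop never running, while B's virtual table of size n*n is nonempty.
def Pre_solution (n : Int) (left : Int) (right : Int) : Prop := 0 ≤ n
instance (n : Int) (left : Int) (right : Int) : Decidable (Pre_solution n left right) := by unfold Pre_solution; infer_instance
def pvWitness_solution : Int × Int × Int := (3, 2, 6)
def Spec_solution (n : Int) (left : Int) (right : Int) (out : List Int) : Prop := out = solution_alt n left right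
instance (n : Int) (left : Int) (right : Int) (out : List Int) : Decidable (Spec_solution n left right out) := by unfold Spec_solution; infer_instance

-- ===== CLAIM (what is proved, stated in full; the proofs are below) =====
def Claim_equal_solution : Prop := ∀ (n : Int) (left : Int) (right : Int), Dom_solution n left right → Pre_solution n left right → Spec_solution n left right (solution n left right)

-- ===== LEMMAS AND PROOFS =====

def pvF (n k : Int) : Int := max (PySem.Int.floordiv k n) (PySem.Int.mod k n) + 1

lemma pv_foldl_app (g : Int → Int) (xs : List Int) (acc : List Int) :
    xs.foldl (fun a x => a ++ [g x]) acc = acc ++ xs.map g := by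
  induction xs generalizing acc with
  | nil => simp
  | cons x xs ih => simp [List.foldl, ih]

lemma pv_foldl_outer (row : Int → List Int) (xs : List Int) (acc : List Int) :
    xs.foldl (fun a c => a ++ row c) acc = acc ++ xs.flatMap row := by
  induction xs generalizing acc with
  | nil => simp
  | cons x xs ih => simp [List.foldl, ih]

lemma pv_row (n c : Int) (hn : 0 < n) :
    (PySem.List.pyRange 1 (n+1) 1).map (fun i => if i ≤ c then c else i)
      = (PySem.List.pyRange ((c-1)*n) (c*n) 1).map (pvF n) := by
  rw [PySem.List.pyRange_one 1 (n+1), PySem.List.pyRange_one ((c-1)*n) (c*n)]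
  have hd : (c*n - (c-1)*n) = n := by ring
  rw [hd]
  have he : (n + 1 - 1) = n := by ring
  rw [he]
  simp only [List.map_map]
  apply List.map_congr_left
  intro j hj
  simp only [List.mem_range] at hj
  have hjn : (j : Int) < n := by omega
  have hj0 : (0 : Int) ≤ j := by positivity
  have hfd : PySem.Int.floordiv ((c-1)*n + j) n = c - 1 := by
    rw [PySem.Int.floordiv_eq_iff_of_pos hn]
    constructor
    · linarith
    · nlinarith
  have hmod : PySem.Int.mod ((c-1)*n + j) n = j := by
    have h := PySem.Int.floordiv_mul_add_mod ((c-1)*n + (j:Int)) n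
    rw [hfd] at h
    linarith
  simp only [Function.comp, pvF, hfd, hmod]
  omega

lemma pv_answer (n : Int) (hn : 0 < n) (c : Nat) (hc : (c : Int) ≤ n) :
    (PySem.List.pyRange 1 ((c:Int)+1) 1).flatMap
        (fun c' => (PySem.List.pyRange 1 (n+1) 1).map (fun i => if i ≤ c' then c' else i))
      = (PySem.List.pyRange 0 ((c:Int)*n) 1).map (pvF n) := by
  induction c with
  | zero =>
    rw [PySem.List.pyRange_one_eq_nil (by norm_num : ((0:Nat):Int) + 1 ≤ 1)]
    rw [PySem.List.pyRange_one_eq_nil (by simp : ((0:Nat):Int) * n ≤ 0)]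
    simp
  | succ c ih =>
    have hc' : (c : Int) ≤ n := by push_cast at hc ⊢; omega
    have hcast : ((c+1 : Nat) : Int) = (c : Int) + 1 := by push_cast; ring
    rw [hcast]
    rw [PySem.List.pyRange_one_succ_right (by omega : (1:Int) ≤ (c:Int) + 1)]
    rw [List.flatMap_append]
    rw [ih hc']
    simp only [List.flatMap_cons, List.flatMap_nil, List.append_nil]
    rw [pv_row n ((c:Int)+1) hn]
    have h1 : ((c:Int)+1-1) * n = (c:Int) * n := by ring
    rw [h1]
    rw [PySem.List.pyRange_one_append 0 ((c:Int)*n) (((c:Int)+1)*n) (by positivity) (by nlinarith)]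
    rw [List.map_append]

-- slicing commutes with map
lemma pv_slice_map (f : Int → Int) (xs : List Int) (a b : Int) :
    PySem.List.slice (xs.map f) (some a) (some b)
      = (PySem.List.slice xs (some a) (some b)).map f := by
  simp only [PySem.List.slice, List.length_map, List.map_take, List.map_drop]

-- A's answer list is the table of pvF over the flat index range
lemma pv_answer_eq (n : Int) (hn : 0 ≤ n) :
    (PySem.List.pyRange 1 (n+1) 1).foldl
      (fun acc count => (PySem.List.pyRange 1 (n+1) 1).foldl
        (fun acc2 i => acc2 ++ [if i ≤ count then count else i]) acc) ([]:List Int)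
    = (PySem.List.pyRange 0 (n*n) 1).map (pvF n) := by
  rcases lt_or_eq_of_le hn with hpos | hzero
  · simp only [pv_foldl_app]
    rw [pv_foldl_outer, List.nil_append]
    have hcast : ((n.toNat : Int)) = n := by omega
    have h := pv_answer n hpos n.toNat (by omega)
    rw [hcast] at h
    exact h
  · rw [← hzero]
    rw [PySem.List.pyRange_one_eq_nil (by norm_num : (0:Int)+1 ≤ 1)]
    rw [PySem.List.pyRange_one_eq_nil (by norm_num : (0:Int)*0 ≤ 0)]
    simp

-- ===== VERDICT (by name: the statement is the Claim_ definition above) =====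
theorem solution_spec : Claim_equal_solution := by
  intro n l r _ hn
  unfold Spec_solution solution solution_alt
  rw [pv_answer_eq n hn]
  rw [pv_slice_map]
  rfl
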